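-- pv_equiv track=rewrite | github.com/progsi/YTUnCoverLLM | preprocessing/Utils.py | char_idx_to_word_idx
-- ===== SOURCE A (Python) =====
-- def char_idx_to_word_idx(s: str, idx: int) -> int:
--     """Helper to transform char index in string to word index (after split by space).
--     Args:
--         s (str): word index
--         idx (int): char index
--     Returns:
--         int: word level index
--     """
--     cur_idx = 0
--     for w_idx, word in enumerate(s.split()):
--         # consider length and space
--         cur_len = len(word)
--         if cur_idx <= idx < cur_idx + cur_len:
--             return w_idx
--         cur_idx += cur_len + 1
--     return
-- ===== SOURCE B (Python) =====
-- def char_idx_to_word_idx(s: str, idx: int):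
--     words = s.split()
--     starts = []
--     pos = 0
--     for w in words:
--         starts.append(pos)
--         pos += len(w) + 1
--     lo, hi = 0, len(starts)
--     while lo < hi:
--         mid = (lo + hi) // 2
--         if idx < starts[mid]:
--             hi = mid
--         else:
--             lo = mid + 1
--     if lo == 0:
--         return None
--     i = lo - 1
--     if idx < starts[i] + len(words[i]):
--         return i
--     return None
-- ===== Notes on version B (the rewrite author's own statement) =====
-- stated objective: alternative
-- what changed: B replaces A's linear scan over enumerate(s.split()) by first building the reconstructed word-start offset table (accumulating len(word)+1) and then locating the candidate word with a hand-written bisect_right binary search, followed by a single in-range check.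
import Mathlib
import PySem

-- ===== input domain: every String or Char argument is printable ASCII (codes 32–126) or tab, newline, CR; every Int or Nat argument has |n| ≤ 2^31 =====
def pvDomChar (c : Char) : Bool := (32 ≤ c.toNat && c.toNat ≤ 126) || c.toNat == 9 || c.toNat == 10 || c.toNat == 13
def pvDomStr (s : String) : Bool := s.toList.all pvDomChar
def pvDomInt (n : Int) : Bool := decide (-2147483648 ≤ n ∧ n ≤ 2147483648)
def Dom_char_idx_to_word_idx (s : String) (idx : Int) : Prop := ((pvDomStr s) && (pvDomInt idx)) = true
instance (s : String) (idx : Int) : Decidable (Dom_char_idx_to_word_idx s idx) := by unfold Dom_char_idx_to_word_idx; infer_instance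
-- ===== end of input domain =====

-- B replaces A's linear scan with a reconstructed word-start offset table plus a hand-written
-- binary search (bisect_right) over it; same return value everywhere, no speed claim.

-- ===== PORT A =====
-- A's for-loop over enumerate(s.split()) with an early return.
def pvALoop (idx : Int) (cur : Int) : List (Int × String) → Option Int
  | [] => none
  | (wIdx, word) :: rest =>
    let curLen := PySem.Str.len word
    if cur ≤ idx ∧ idx < cur + curLen then some wIdx
    else pvALoop idx (cur + curLen + 1) rest

def char_idx_to_word_idx (s : String) (idx : Int) : Option Int :=
  pvALoop idx 0 (PySem.List.enumerate (PySem.Str.split₀ s) 0)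

-- ===== PORT B =====
-- B's first loop: build the word-start table (state = (starts, pos)).
def pvBuildStarts (words : List String) : List Int × Int :=
  words.foldl (fun st w => (st.1 ++ [st.2], st.2 + PySem.Str.len w + 1)) ([], 0)

-- B's while-loop: bisect_right over starts.
def pvBisect (a : List Int) (idx : Int) (lo hi : Nat) : Nat :=
  if _h : lo < hi then
    if idx < a.getD ((lo + hi) / 2) 0 then pvBisect a idx lo ((lo + hi) / 2)
    else pvBisect a idx ((lo + hi) / 2 + 1) hi
  else lo
termination_by hi - lo
decreasing_by all_goals omega

def char_idx_to_word_idx_alt (s : String) (idx : Int) : Option Int :=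
  let words := PySem.Str.split₀ s
  let starts := (pvBuildStarts words).1
  let lo := pvBisect starts idx 0 starts.length
  if lo = 0 then none
  else
    let i := lo - 1
    if idx < starts.getD i 0 + PySem.Str.len (words.getD i "") then some (i : Int)
    else none

-- ===== PRECONDITION & SPEC =====
def Spec_char_idx_to_word_idx (s : String) (idx : Int) (out : Option Int) : Prop := out = char_idx_to_word_idx_alt s idx
instance (s : String) (idx : Int) (out : Option Int) : Decidable (Spec_char_idx_to_word_idx s idx out) := by unfold Spec_char_idx_to_word_idx; infer_instance

-- ===== CLAIM (what is proved, stated in full; the proofs are below) =====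
def Claim_equal_char_idx_to_word_idx : Prop := ∀ (s : String) (idx : Int), Dom_char_idx_to_word_idx s idx → Spec_char_idx_to_word_idx s idx (char_idx_to_word_idx s idx)

-- ===== LEMMAS AND PROOFS =====

-- Specification list of word-start offsets (proof-only helper).
def pvStartsAux (c : Int) : List String → List Int
  | [] => []
  | w :: ws => c :: pvStartsAux (c + PySem.Str.len w + 1) ws

theorem pvLenNonneg (w : String) : 0 ≤ PySem.Str.len w := by
  simp [PySem.Str.len]


theorem pvBuildStarts_eq (ws : List String) : ∀ (acc : List Int) (c : Int),
    (ws.foldl (fun st w => (st.1 ++ [st.2], st.2 + PySem.Str.len w + 1)) (acc, c)).1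
      = acc ++ pvStartsAux c ws := by
  induction ws with
  | nil => intro acc c; simp [pvStartsAux]
  | cons w ws ih =>
    intro acc c
    simp only [List.foldl_cons, pvStartsAux]
    rw [ih]
    simp


theorem pvStartsAux_length (ws : List String) : ∀ c, (pvStartsAux c ws).length = ws.length := by
  induction ws with
  | nil => intro c; simp [pvStartsAux]
  | cons w ws ih => intro c; simp [pvStartsAux, ih]


theorem pvStartsAux_mem_ge (ws : List String) : ∀ c x, x ∈ pvStartsAux c ws → c ≤ x := by
  induction ws with
  | nil => intro c x hx; simp [pvStartsAux] at hx
  | cons w ws ih =>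
    intro c x hx
    simp only [pvStartsAux, List.mem_cons] at hx
    rcases hx with rfl | hx
    · exact le_refl x
    · have := ih _ _ hx
      have := pvLenNonneg w
      omega


theorem pvStartsAux_getD_succ (ws : List String) : ∀ c (j : Nat), j + 1 < ws.length →
    (pvStartsAux c ws).getD (j+1) 0
      = (pvStartsAux c ws).getD j 0 + PySem.Str.len (ws.getD j "") + 1 := by
  induction ws with
  | nil => intro c j h; simp at h
  | cons w ws ih =>
    intro c j h
    cases j with
    | zero =>
      cases ws with
      | nil => simp at h
      | cons w' ws' => simp [pvStartsAux, List.getD]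
    | succ k =>
      simp only [pvStartsAux, List.getD_cons_succ, List.getD_cons_succ]
      have := ih (c + PySem.Str.len w + 1) k (by simpa using h)
      simpa using this


theorem pvStartsAux_mono (ws : List String) (c : Int) (j k : Nat) (hjk : j ≤ k)
    (hk : k < ws.length) :
    (pvStartsAux c ws).getD j 0 ≤ (pvStartsAux c ws).getD k 0 := by
  rcases Nat.lt_or_ge j k with h | h
  · have hp : (pvStartsAux c ws).Pairwise (· < ·) := by
      clear hjk hk h j k
      induction ws generalizing c with
      | nil => simp [pvStartsAux]
      | cons w ws ih =>
        simp only [pvStartsAux, List.pairwise_cons]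
        refine ⟨fun x hx => ?_, ih _⟩
        have := pvStartsAux_mem_ge ws (c + PySem.Str.len w + 1) x hx
        have := pvLenNonneg w
        omega
    have hk' : k < (pvStartsAux c ws).length := by rw [pvStartsAux_length]; exact hk
    have hj' : j < (pvStartsAux c ws).length := lt_trans h hk'
    rw [List.getD_eq_getElem _ _ hj', List.getD_eq_getElem _ _ hk']
    exact le_of_lt ((List.pairwise_iff_getElem.mp hp) j k hj' hk' h)
  · have : j = k := le_antisymm hjk h
    subst this; exact le_refl _


theorem pvALoop_nil (idx cur : Int) : pvALoop idx cur [] = none := rfl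

theorem pvALoop_cons (idx cur i0 : Int) (w : String) (rest : List (Int × String)) :
    pvALoop idx cur ((i0, w) :: rest)
      = if cur ≤ idx ∧ idx < cur + PySem.Str.len w then some i0
        else pvALoop idx (cur + PySem.Str.len w + 1) rest := rfl

theorem pvALoop_some (idx : Int) (ws : List String) : ∀ (c i0 : Int) (j : Nat),
    j < ws.length →
    (pvStartsAux c ws).getD j 0 ≤ idx →
    idx < (pvStartsAux c ws).getD j 0 + PySem.Str.len (ws.getD j "") →
    pvALoop idx c (PySem.List.enumerate ws i0) = some (i0 + j) := by
  induction ws with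
  | nil => intro c i0 j h; simp at h
  | cons w ws ih =>
    intro c i0 j hj hlo hhi
    rw [PySem.List.enumerate_cons, pvALoop_cons]
    cases j with
    | zero =>
      simp only [pvStartsAux, List.getD_cons_zero] at hlo hhi
      rw [if_pos ⟨hlo, hhi⟩]
      norm_num
    | succ k =>
      have hk : k < ws.length := by simpa using hj
      have hkl : k < (pvStartsAux (c + PySem.Str.len w + 1) ws).length := by
        rw [pvStartsAux_length]; exact hk
      have hge : c + PySem.Str.len w + 1 ≤ (pvStartsAux (c + PySem.Str.len w + 1) ws).getD k 0 := by
        apply pvStartsAux_mem_ge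
        rw [List.getD_eq_getElem _ _ hkl]
        exact List.getElem_mem _
      simp only [pvStartsAux, List.getD_cons_succ] at hlo hhi
      have hnot : ¬(c ≤ idx ∧ idx < c + PySem.Str.len w) := by
        intro h; omega
      rw [if_neg hnot, ih (c + PySem.Str.len w + 1) (i0 + 1) k hk hlo hhi]
      congr 1
      push_cast
      ring



theorem pvALoop_none (idx : Int) (ws : List String) : ∀ (c i0 : Int),
    (∀ j : Nat, j < ws.length →
      ¬((pvStartsAux c ws).getD j 0 ≤ idx ∧
        idx < (pvStartsAux c ws).getD j 0 + PySem.Str.len (ws.getD j ""))) →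
    pvALoop idx c (PySem.List.enumerate ws i0) = none := by
  induction ws with
  | nil => intro c i0 _; simp [PySem.List.enumerate, pvALoop_nil]
  | cons w ws ih =>
    intro c i0 hno
    rw [PySem.List.enumerate_cons, pvALoop_cons]
    have h0 := hno 0 (by simp)
    simp only [pvStartsAux, List.getD_cons_zero] at h0
    rw [if_neg h0]
    apply ih
    intro j hj
    have := hno (j+1) (by simpa using hj)
    simpa [pvStartsAux] using this



theorem pvBisect_spec (a : List Int) (idx : Int)
    (hmono : ∀ j k : Nat, j ≤ k → k < a.length → a.getD j 0 ≤ a.getD k 0) :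
    ∀ (n lo hi : Nat), hi - lo ≤ n → lo ≤ hi → hi ≤ a.length →
    (∀ k, k < lo → a.getD k 0 ≤ idx) →
    (∀ k, hi ≤ k → k < a.length → idx < a.getD k 0) →
    lo ≤ pvBisect a idx lo hi ∧ pvBisect a idx lo hi ≤ hi ∧
    (∀ k, k < pvBisect a idx lo hi → a.getD k 0 ≤ idx) ∧
    (∀ k, pvBisect a idx lo hi ≤ k → k < a.length → idx < a.getD k 0) := by
  intro n
  induction n with
  | zero =>
    intro lo hi hfuel hle hhi hloinv hhiinv
    have : lo = hi := by omega
    subst this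
    rw [pvBisect]
    simp only [lt_irrefl, dite_false]
    exact ⟨le_refl _, le_refl _, hloinv, fun k hk hk' => hhiinv k hk hk'⟩
  | succ n ih =>
    intro lo hi hfuel hle hhi hloinv hhiinv
    rw [pvBisect]
    by_cases h : lo < hi
    · rw [dif_pos h]
      split_ifs with hmid
      · -- idx < a[(lo+hi)/2] : recurse on (lo, mid)
        have h1 : (lo + hi) / 2 < hi := by omega
        have h2 : lo ≤ (lo + hi) / 2 := by omega
        have := ih lo ((lo + hi) / 2) (by omega) h2 (by omega)
          hloinv
          (fun k hk hk' => lt_of_lt_of_le hmid (hmono _ _ hk hk'))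
        exact ⟨this.1, le_trans this.2.1 (le_of_lt h1), this.2.2⟩
      · rw [not_lt] at hmid
        have h1 : (lo + hi) / 2 < hi := by omega
        have h2 : lo ≤ (lo + hi) / 2 := by omega
        have hmidlen : (lo + hi) / 2 < a.length := lt_of_lt_of_le h1 hhi
        have := ih ((lo + hi) / 2 + 1) hi (by omega) (by omega) hhi
          (fun k hk => le_trans (hmono k ((lo + hi) / 2) (by omega) hmidlen) hmid)
          hhiinv
        exact ⟨by omega, this.2.1, this.2.2⟩
    · rw [dif_neg h]
      have : lo = hi := by omega
      subst this
      exact ⟨le_refl _, le_refl _, hloinv, fun k hk hk' => hhiinv k hk hk'⟩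


-- ===== VERDICT (by name: the statement is the Claim_ definition above) =====
theorem char_idx_to_word_idx_spec : Claim_equal_char_idx_to_word_idx := by
  intro s idx _
  unfold Spec_char_idx_to_word_idx
  have hstarts : (pvBuildStarts (PySem.Str.split₀ s)).1 = pvStartsAux 0 (PySem.Str.split₀ s) := by
    unfold pvBuildStarts
    rw [pvBuildStarts_eq]
    simp
  simp only [char_idx_to_word_idx, char_idx_to_word_idx_alt, hstarts]
  set ws := PySem.Str.split₀ s with hws
  set S := pvStartsAux 0 ws with hS
  have hlen : S.length = ws.length := pvStartsAux_length ws 0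
  have hmono : ∀ j k : Nat, j ≤ k → k < S.length → S.getD j 0 ≤ S.getD k 0 := by
    intro j k hjk hk
    exact pvStartsAux_mono ws 0 j k hjk (by omega)
  obtain ⟨_, hrle, hbelow, habove⟩ :=
    pvBisect_spec S idx hmono S.length 0 S.length (by omega) (by omega) (le_refl _)
      (by omega) (by omega)
  set r := pvBisect S idx 0 S.length with hr
  by_cases hr0 : r = 0
  · rw [if_pos hr0]
    apply pvALoop_none
    intro j hj hc
    rw [← hS] at hc
    have := habove j (by omega) (by omega)
    omega
  · rw [if_neg hr0]
    have hi : r - 1 < ws.length := by omega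
    have hSle : S.getD (r-1) 0 ≤ idx := hbelow (r-1) (by omega)
    by_cases hin : idx < S.getD (r-1) 0 + PySem.Str.len (ws.getD (r-1) "")
    · rw [if_pos hin, pvALoop_some idx ws 0 0 (r-1) hi hSle hin]
      norm_num
    · rw [if_neg hin]
      apply pvALoop_none
      intro j hj hc
      rw [← hS] at hc
      obtain ⟨h1, h2⟩ := hc
      rcases lt_trichotomy j (r-1) with hlt | heq | hgt
      · have hsucc := pvStartsAux_getD_succ ws 0 j (by omega)
        have hmono' := hmono (j+1) (r-1) (by omega) (by omega)
        rw [← hS] at hsucc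
        omega
      · subst heq
        omega
      · have := habove j (by omega) (by omega)
        omega
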